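-- pv_equiv track=rewrite | github.com/UshyneEsclamado/IntelliGrade | intelligrade/backend/services/mock_processor.py | extract_assessment_title
-- ===== SOURCE A (Python) =====
-- def extract_assessment_title(content: str) -> str:
--     """
--     Extract assessment title from file content
--     TODO: Implement real title extraction logic
--     """
--     # Simple mock - use first line or look for "Title:" pattern
--     lines = content.split('\n')
--     for line in lines:
--         if 'title:' in line.lower():
--             return line.split(':', 1)[1].strip()
--     # Fallback to first non-empty line
--     for line in lines:
--         if line.strip():
--             return line.strip()[:50]  # First 50 chars
--     return "Assessment Title Not Found"
-- ===== SOURCE B (Python) =====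
-- def extract_assessment_title(content: str) -> str:
--     """Single pass: return on a 'title:' line, remember the first non-empty line as fallback."""
--     fallback = None
--     for line in content.split('\n'):
--         if 'title:' in line.lower():
--             return line.split(':', 1)[1].strip()
--         if fallback is None and line.strip():
--             fallback = line.strip()[:50]
--     return fallback if fallback is not None else "Assessment Title Not Found"
-- ===== Notes on version B (the rewrite author's own statement) =====
-- stated objective: simpler
-- what changed: Fuses A's two separate scans over the split lines into one pass that carries a single fallback accumulator (first non-empty line recorded once), returning immediately when a line contains the title marker.
import Mathlib
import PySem

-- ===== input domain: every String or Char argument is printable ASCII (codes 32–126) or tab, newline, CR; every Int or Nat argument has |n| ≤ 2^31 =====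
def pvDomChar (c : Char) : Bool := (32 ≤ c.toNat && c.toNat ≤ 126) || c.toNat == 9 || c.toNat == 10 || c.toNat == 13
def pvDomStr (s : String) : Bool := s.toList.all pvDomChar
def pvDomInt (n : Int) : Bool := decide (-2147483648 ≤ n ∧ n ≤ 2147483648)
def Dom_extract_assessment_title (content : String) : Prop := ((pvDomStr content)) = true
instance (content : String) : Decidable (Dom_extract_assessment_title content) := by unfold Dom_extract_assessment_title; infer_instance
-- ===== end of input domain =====

-- B fuses A's two scans over the lines into one pass with a single fallback accumulator (objective: simpler).

-- shared expression 'line.split(':', 1)[1].strip()' (textually identical in both Pythons);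
-- the defaults are unreachable: the branch is guarded by the marker being in line.lower(), so ':' ∈ line
-- and split(':',1) yields exactly two pieces.
def pvTitleOf (line : String) : String :=
  PySem.Str.strip (((PySem.Str.splitMax? line ":" 1).getD []).getD 1 "")

-- ===== PORT A =====
-- first loop: return the title part of the first line containing the marker (none if no such line)
def pvALoop1 : List String → Option String
  | [] => none
  | l :: ls =>
    if PySem.Str.isIn "title:" (PySem.Str.lower l) then some (pvTitleOf l)
    else pvALoop1 ls

-- second loop: first 50 chars of the first non-empty (after strip) line, else the sentinel
def pvALoop2 : List String → String
  | [] => "Assessment Title Not Found"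
  | l :: ls =>
    if PySem.Str.strip l ≠ "" then PySem.Str.slice (PySem.Str.strip l) none (some 50)
    else pvALoop2 ls

def extract_assessment_title (content : String) : String :=
  -- lines = content.split('\n'); the separator is non-empty so split? is 'some' (getD unreachable)
  let lines := (PySem.Str.split? content "\n").getD []
  match pvALoop1 lines with
  | some t => t
  | none => pvALoop2 lines

-- ===== PORT B =====
-- single pass carrying the fallback accumulator
def pvBGo : List String → Option String → String
  | [], fb => fb.getD "Assessment Title Not Found"
  | l :: ls, fb =>
    if PySem.Str.isIn "title:" (PySem.Str.lower l) then pvTitleOf l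
    else
      pvBGo ls
        (match fb with
         | some f => some f
         | none =>
           if PySem.Str.strip l ≠ "" then some (PySem.Str.slice (PySem.Str.strip l) none (some 50))
           else none)

def extract_assessment_title_alt (content : String) : String :=
  pvBGo ((PySem.Str.split? content "\n").getD []) none

-- ===== PRECONDITION & SPEC =====
def Spec_extract_assessment_title (content : String) (out : String) : Prop := out = extract_assessment_title_alt content
instance (content : String) (out : String) : Decidable (Spec_extract_assessment_title content out) := by unfold Spec_extract_assessment_title; infer_instance

-- ===== CLAIM (what is proved, stated in full; the proofs are below) =====
def Claim_equal_extract_assessment_title : Prop := ∀ (content : String), Dom_extract_assessment_title content → Spec_extract_assessment_title content (extract_assessment_title content)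

-- ===== LEMMAS AND PROOFS =====
-- loop invariant of B's single pass: with fallback fb it computes A's title-first result,
-- preferring a recorded fallback over A's second scan
theorem pvBGo_eq (lines : List String) (fb : Option String) :
    pvBGo lines fb =
      match pvALoop1 lines with
      | some t => t
      | none => match fb with
                | some f => f
                | none => pvALoop2 lines := by
  induction lines generalizing fb with
  | nil => cases fb <;> rfl
  | cons l ls ih =>
    simp only [pvBGo, pvALoop1, pvALoop2]
    by_cases h : PySem.Chars.isIn ['t','i','t','l','e',':'] (PySem.Chars.lower l.toList) = true
    · simp [h]
    · simp only [ih]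
      cases fb with
      | some f => simp [h]
      | none =>
        by_cases hs : PySem.Str.strip l = "" <;> simp [h, hs]

-- ===== VERDICT (by name: the statement is the Claim_ definition above) =====
theorem extract_assessment_title_spec : Claim_equal_extract_assessment_title := by
  intro content _
  unfold Spec_extract_assessment_title extract_assessment_title extract_assessment_title_alt
  rw [pvBGo_eq]
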